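-- pv_equiv track=rewrite | github.com/jayabhavana342/Checkers-RESTAPI | production/vagrant/app/app.py | checkNorthEast
-- ===== SOURCE A (Python) =====
-- def checkNorthEast(x, y, original, data, counter):
--     if counter == 0:
--         return True
--     elif x == -1 or y == -1:
--         return False
--     else:
--         try:
--             return checkNorthEast(x - 1, y + 1, original, data, counter - 1) and data[x][y] == original
--         except IndexError:
--             return False
-- ===== SOURCE B (Python) =====
-- def checkNorthEast(x, y, original, data, counter):
--     # Two staged passes instead of A's recursion: first scan the diagonal for a
--     # -1 boundary guard, then check every cell's value against the original.
--     if counter < 0: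
--         return False  # a negative count can never be walked down to zero
--     if any(x - k == -1 or y + k == -1 for k in range(counter)):
--         return False
--     try:
--         return all(data[x - k][y + k] == original for k in range(counter))
--     except IndexError:
--         return False
-- ===== Notes on version B (the rewrite author's own statement) =====
-- stated objective: alternative
-- what changed: Replaced A's single recursive descent (which checks each cell only while unwinding) with two staged forward scans over the diagonal: an any() scan for a -1 boundary guard, then an all() scan comparing every cell to the original; generator scans avoid Python function-call overhead per cell, all failures collapse to False so the value is identical.
-- outside the precondition, e.g. on checkNorthEast(950, 0, 0, [], 950): A returns False, B returns False
import Mathlib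
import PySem

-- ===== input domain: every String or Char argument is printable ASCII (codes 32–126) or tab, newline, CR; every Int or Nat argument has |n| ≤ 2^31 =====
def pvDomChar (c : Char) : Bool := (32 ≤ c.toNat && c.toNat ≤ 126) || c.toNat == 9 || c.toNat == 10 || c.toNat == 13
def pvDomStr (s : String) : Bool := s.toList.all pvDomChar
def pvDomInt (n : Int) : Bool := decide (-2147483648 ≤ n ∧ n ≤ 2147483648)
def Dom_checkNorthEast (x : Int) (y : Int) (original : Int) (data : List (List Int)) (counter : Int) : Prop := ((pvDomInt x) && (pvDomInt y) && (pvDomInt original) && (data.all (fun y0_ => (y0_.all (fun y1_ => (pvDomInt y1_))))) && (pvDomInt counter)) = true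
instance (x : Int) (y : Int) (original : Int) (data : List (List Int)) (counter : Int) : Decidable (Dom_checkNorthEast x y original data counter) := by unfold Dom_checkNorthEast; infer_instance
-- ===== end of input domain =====

-- B replaces A's single recursive descent by two staged scans over the diagonal:
-- a boundary-guard scan followed by a cell-value scan; same value on all inputs
-- on which A returns (objective: alternative decomposition).

-- ===== PORT A =====
-- A's Python recursion is not well-founded (it diverges / hits CPython's
-- recursion limit on deep inputs), so the port carries a Nat fuel; fuel 1000
-- mirrors CPython's default recursion limit and exceeds every recursion depth
-- admitted by Pre_checkNorthEast, where the port is exact.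
def checkNorthEastFuel : Nat → Int → Int → Int → List (List Int) → Int → Bool
  | 0, _, _, _, _, _ => false
  | fuel+1, x, y, original, data, counter =>
    if counter = 0 then true
    else if x = -1 ∨ y = -1 then false
    else
      -- `rec and data[x][y] == original`: the recursive call is evaluated first;
      -- an out-of-range data[x][y] (IndexError) yields False.
      let r := checkNorthEastFuel fuel (x-1) (y+1) original data (counter-1)
      if r then
        match PySem.List.pyGet? data x with
        | none => false
        | some row =>
          match PySem.List.pyGet? row y with
          | none => false
          | some v => decide (v = original)
      else false

def checkNorthEast (x : Int) (y : Int) (original : Int) (data : List (List Int)) (counter : Int) : Bool :=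
  checkNorthEastFuel 1000 x y original data counter

-- ===== PORT B =====
-- `any(x - k == -1 or y + k == -1 for k in range(counter))`, ported as a
-- short-circuiting scan over the counter steps of the diagonal.
def neGuardScan : Int → Int → Nat → Bool
  | _, _, 0 => false
  | x, y, n+1 => (x == -1 || y == -1) || neGuardScan (x-1) (y+1) n

-- `all(data[x-k][y+k] == original for k in range(counter))` with
-- IndexError → False: a second scan checking each cell's value.
def neCellScan (original : Int) (data : List (List Int)) : Int → Int → Nat → Bool
  | _, _, 0 => true
  | x, y, n+1 =>
    match PySem.List.pyGet? data x with
    | none => false            -- IndexError → False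
    | some row =>
      match PySem.List.pyGet? row y with
      | none => false          -- IndexError → False
      | some v => v == original && neCellScan original data (x-1) (y+1) n

def checkNorthEast_alt (x : Int) (y : Int) (original : Int) (data : List (List Int)) (counter : Int) : Bool :=
  if counter < 0 then false    -- a negative count can never be walked down to zero
  else if neGuardScan x y counter.toNat then false
  else neCellScan original data x y counter.toNat

-- ===== PRECONDITION & SPEC =====
-- Pre_ excludes the inputs on which Python A raises RecursionError (or recurses
-- forever): the recursion stops only when counter reaches 0, x reaches -1 or y
-- reaches -1 within CPython's recursion limit (~1000); the bound 900 is
-- conservative, so a thin band of returning inputs with stopping depth between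
-- 900 and the limit is also excluded (see cites).
def Pre_checkNorthEast (x : Int) (y : Int) (original : Int) (data : List (List Int)) (counter : Int) : Prop :=
  (0 ≤ counter ∧ counter ≤ 900) ∨ (-1 ≤ x ∧ x ≤ 899) ∨ (-901 ≤ y ∧ y ≤ -1)
instance (x : Int) (y : Int) (original : Int) (data : List (List Int)) (counter : Int) : Decidable (Pre_checkNorthEast x y original data counter) := by unfold Pre_checkNorthEast; infer_instance

def pvWitness_checkNorthEast : Int × Int × Int × List (List Int) × Int :=
  (1, 0, 5, [[3, 5], [5, 7]], 2)

def Spec_checkNorthEast (x : Int) (y : Int) (original : Int) (data : List (List Int)) (counter : Int) (out : Bool) : Prop := out = checkNorthEast_alt x y original data counter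
instance (x : Int) (y : Int) (original : Int) (data : List (List Int)) (counter : Int) (out : Bool) : Decidable (Spec_checkNorthEast x y original data counter out) := by unfold Spec_checkNorthEast; infer_instance

-- ===== CLAIM (what is proved, stated in full; the proofs are below) =====
def Claim_equal_checkNorthEast : Prop := ∀ (x : Int) (y : Int) (original : Int) (data : List (List Int)) (counter : Int), Dom_checkNorthEast x y original data counter → Pre_checkNorthEast x y original data counter → Spec_checkNorthEast x y original data counter (checkNorthEast x y original data counter)

-- ===== LEMMAS AND PROOFS =====

-- With enough fuel and a Nat counter, A's recursion equals "no guard fires and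
-- every cell matches": all of A's failures collapse to false, so the order of
-- the guard scan and the cell scan does not matter.
theorem fuel_eq_scans (n : Nat) : ∀ (fuel : Nat), n < fuel → ∀ (x y original : Int) (data : List (List Int)),
    checkNorthEastFuel fuel x y original data (n : Int)
      = (!neGuardScan x y n && neCellScan original data x y n) := by
  induction n with
  | zero =>
    intro fuel hf x y original data
    match fuel, hf with
    | f+1, _ => simp [checkNorthEastFuel, neGuardScan, neCellScan]
  | succ m ih =>
    intro fuel hf x y original data
    match fuel, hf with
    | f+1, hf =>
      have hm : m < f := Nat.lt_of_succ_lt_succ hf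
      have hc : ¬ ((m+1 : Nat) : Int) = 0 := by push_cast; omega
      have hcast : ((m+1 : Nat) : Int) - 1 = (m : Int) := by push_cast; ring
      by_cases hxy : x = -1 ∨ y = -1
      · have hg : neGuardScan x y (m+1) = true := by
          rcases hxy with h | h <;> simp [neGuardScan, h]
        simp only [checkNorthEastFuel, if_neg hc, if_pos hxy, hg, Bool.not_true,
          Bool.false_and]
      · have hg : neGuardScan x y (m+1) = neGuardScan (x-1) (y+1) m := by
          obtain ⟨hx1, hy1⟩ := not_or.mp hxy
          simp [neGuardScan, hx1, hy1]
        simp only [checkNorthEastFuel, if_neg hc, if_neg hxy, hcast, ih f hm, hg]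
        cases hG : neGuardScan (x-1) (y+1) m with
        | true =>
          simp only [Bool.not_true, Bool.false_and, if_neg (by simp : ¬ (false = true))]
        | false =>
          simp only [Bool.not_false, Bool.true_and, neCellScan]
          cases hx : PySem.List.pyGet? data x with
          | none => simp
          | some row =>
            cases hy : PySem.List.pyGet? row y with
            | none => simp [hy]
            | some v =>
              simp only [hy]
              rw [Bool.and_comm]
              by_cases hv : v = original <;> simp [hv]

-- If the boundary guard fires within fuel steps while the counter never hits
-- zero first, A returns false.
theorem fuel_false_of_guard : ∀ (fuel : Nat) (x y original : Int) (data : List (List Int)) (c : Int)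
    (k : Nat), k < fuel → (∀ j : Nat, j ≤ k → c - (j : Int) ≠ 0) →
    (x - (k : Int) = -1 ∨ y + (k : Int) = -1) →
    checkNorthEastFuel fuel x y original data c = false := by
  intro fuel
  induction fuel with
  | zero => intro x y original data c k hk _ _; exact absurd hk (Nat.not_lt_zero k)
  | succ f ih =>
    intro x y original data c k hk hcz hg
    have hc0 : ¬ c = 0 := by have := hcz 0 (Nat.zero_le k); simpa using this
    simp only [checkNorthEastFuel, if_neg hc0]
    by_cases hxy : x = -1 ∨ y = -1
    · rw [if_pos hxy]
    · rw [if_neg hxy]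
      have hkne : k ≠ 0 := by
        rintro rfl
        simp only [Nat.cast_zero, sub_zero, add_zero] at hg
        exact hxy hg
      obtain ⟨k', rfl⟩ := Nat.exists_eq_succ_of_ne_zero hkne
      have hr : checkNorthEastFuel f (x-1) (y+1) original data (c-1) = false := by
        apply ih (x-1) (y+1) original data (c-1) k'
        · omega
        · intro j hj
          have := hcz (j+1) (by omega)
          push_cast at this ⊢
          omega
        · rcases hg with h | h
          · left; push_cast at h ⊢; omega
          · right; push_cast at h ⊢; omega
      simp [hr]

-- The guard scan reports true as soon as some step within range hits -1.
theorem guardScan_true : ∀ (n : Nat) (x y : Int) (k : Nat), k < n →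
    (x - (k : Int) = -1 ∨ y + (k : Int) = -1) → neGuardScan x y n = true := by
  intro n
  induction n with
  | zero => intro x y k hk _; exact absurd hk (Nat.not_lt_zero k)
  | succ m ih =>
    intro x y k hk hg
    rcases Nat.eq_zero_or_pos k with rfl | hkpos
    · simp only [Nat.cast_zero, sub_zero, add_zero] at hg
      rcases hg with h | h <;> simp [neGuardScan, h]
    · obtain ⟨k', rfl⟩ := Nat.exists_eq_succ_of_ne_zero (Nat.pos_iff_ne_zero.mp hkpos)
      have hrec : neGuardScan (x-1) (y+1) m = true := by
        apply ih (x-1) (y+1) k' (by omega)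
        rcases hg with h | h
        · left; push_cast at h ⊢; omega
        · right; push_cast at h ⊢; omega
      simp [neGuardScan, hrec]

theorem pvWitness_ok :
    Dom_checkNorthEast pvWitness_checkNorthEast.1 pvWitness_checkNorthEast.2.1
      pvWitness_checkNorthEast.2.2.1 pvWitness_checkNorthEast.2.2.2.1
      pvWitness_checkNorthEast.2.2.2.2
    ∧ Pre_checkNorthEast pvWitness_checkNorthEast.1 pvWitness_checkNorthEast.2.1
      pvWitness_checkNorthEast.2.2.1 pvWitness_checkNorthEast.2.2.2.1
      pvWitness_checkNorthEast.2.2.2.2 := by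
  constructor <;> decide

-- ===== VERDICT (by name: the statement is the Claim_ definition above) =====
theorem checkNorthEast_spec : Claim_equal_checkNorthEast := by
  intro x y original data counter _ hpre
  unfold Spec_checkNorthEast checkNorthEast checkNorthEast_alt
  by_cases h1 : 0 ≤ counter ∧ counter ≤ 900
  · have hn : ((counter.toNat : Nat) : Int) = counter := Int.toNat_of_nonneg h1.1
    have hlt : counter.toNat < 1000 := by omega
    rw [if_neg (by omega : ¬ counter < 0), ← hn,
      fuel_eq_scans counter.toNat 1000 hlt x y original data]
    have hmx : (max counter 0).toNat = counter.toNat := by omega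
    cases hG : neGuardScan x y counter.toNat <;> simp [hmx, hG]
  · have h2 : counter < 0 ∨ 900 < counter := by omega
    obtain ⟨k, hk900, hg⟩ :
        ∃ k : Nat, k ≤ 900 ∧ (x - (k : Int) = -1 ∨ y + (k : Int) = -1) := by
      rcases hpre with hp | hp | hp
      · exact absurd hp h1
      · exact ⟨(x+1).toNat, by omega, Or.inl (by omega)⟩
      · exact ⟨(-1-y).toNat, by omega, Or.inr (by omega)⟩
    have hA : checkNorthEastFuel 1000 x y original data counter = false := by
      apply fuel_false_of_guard 1000 x y original data counter k (by omega)
      · intro j hj; omega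
      · exact hg
    rw [hA]
    rcases h2 with hneg | hbig
    · rw [if_pos hneg]
    · rw [if_neg (by omega : ¬ counter < 0),
        guardScan_true counter.toNat x y k (by omega) hg]
      rfl
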